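-- pv_equiv track=rewrite | github.com/ai4se4ai-lab/emp-pub2exc | agents/auditor_supervisor/agent.py | _select_reference_paths
-- ===== SOURCE A (Python) =====
-- def _select_reference_paths(paths: list[str], limit: int = 12) -> list[str]:
--     preferred: list[str] = []
--     keywords = (
--         "readme",
--         "requirements",
--         "pyproject",
--         "setup.py",
--         "src/",
--         "tests/",
--         "train",
--         "model",
--         "dataset",
--         "experiment",
--     )
--     for path in paths:
--         lower = path.lower()
--         if lower.endswith((".md", ".py", ".toml", ".txt", ".yaml", ".yml", ".json")) and any(
--             key in lower for key in keywords
--         ):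
--             preferred.append(path)
--     if len(preferred) >= limit:
--         return preferred[:limit]
--     remaining = [
--         path
--         for path in paths
--         if path not in preferred and path.lower().endswith((".py", ".md", ".toml", ".txt"))
--     ]
--     return (preferred + remaining)[:limit]
-- ===== SOURCE B (Python) =====
-- def _select_reference_paths(paths: list[str], limit: int = 12) -> list[str]:
--     keywords = (
--         "readme", "requirements", "pyproject", "setup.py", "src/",
--         "tests/", "train", "model", "dataset", "experiment",
--     )
--     preferred: list[str] = []
--     remaining: list[str] = []
--     for path in paths:
--         lower = path.lower()
--         if lower.endswith((".md", ".py", ".toml", ".txt", ".yaml", ".yml", ".json")) and any(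
--             key in lower for key in keywords
--         ):
--             preferred.append(path)
--         elif lower.endswith((".py", ".md", ".toml", ".txt")):
--             remaining.append(path)
--     if len(preferred) >= limit:
--         return preferred[:limit]
--     return (preferred + remaining)[:limit]
-- ===== Notes on version B (the rewrite author's own statement) =====
-- stated objective: alternative
-- what changed: B classifies each path in a single pass into two buckets (preferred, remaining) using a direct else-branch predicate, replacing A's second scan over paths with its 'path not in preferred' linear membership test.
import Mathlib
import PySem

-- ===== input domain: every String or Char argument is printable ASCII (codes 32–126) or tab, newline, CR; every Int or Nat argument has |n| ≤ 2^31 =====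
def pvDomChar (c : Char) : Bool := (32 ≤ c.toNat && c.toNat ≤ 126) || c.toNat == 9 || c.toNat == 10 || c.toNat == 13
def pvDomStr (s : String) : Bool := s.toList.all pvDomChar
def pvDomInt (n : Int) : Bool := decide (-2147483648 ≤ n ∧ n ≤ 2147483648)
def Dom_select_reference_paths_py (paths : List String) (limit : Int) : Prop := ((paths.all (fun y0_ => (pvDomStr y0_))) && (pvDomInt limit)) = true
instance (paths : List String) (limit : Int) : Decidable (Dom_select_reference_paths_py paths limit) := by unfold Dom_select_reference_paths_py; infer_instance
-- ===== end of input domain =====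

-- B classifies each path in ONE pass into two buckets (preferred / remaining), replacing A's
-- second scan with its `path not in preferred` membership test; objective: alternative decomposition.


-- ===== PORT A =====
-- the keyword tuple of A
def pvKeywords : List String :=
  ["readme", "requirements", "pyproject", "setup.py", "src/", "tests/", "train", "model", "dataset", "experiment"]

-- `lower.endswith((".md", ".py", ".toml", ".txt", ".yaml", ".yml", ".json")) and any(key in lower …)`
def pvPrefTest (path : String) : Bool :=
  let lower := PySem.Str.lower path
  (PySem.Str.endswith lower ".md" || PySem.Str.endswith lower ".py" || PySem.Str.endswith lower ".toml" ||
   PySem.Str.endswith lower ".txt" || PySem.Str.endswith lower ".yaml" || PySem.Str.endswith lower ".yml" ||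
   PySem.Str.endswith lower ".json")
  && pvKeywords.any (fun key => PySem.Str.isIn key lower)

-- `path.lower().endswith((".py", ".md", ".toml", ".txt"))`
def pvRemTest (path : String) : Bool :=
  let lower := PySem.Str.lower path
  PySem.Str.endswith lower ".py" || PySem.Str.endswith lower ".md" ||
  PySem.Str.endswith lower ".toml" || PySem.Str.endswith lower ".txt"

def select_reference_paths_py (paths : List String) (limit : Int) : List String :=
  let preferred := paths.foldl (fun acc path => if pvPrefTest path then acc ++ [path] else acc) []
  if limit ≤ (preferred.length : Int) then
    PySem.List.slice preferred none (some limit)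
  else
    let remaining := paths.filter (fun path => !(preferred.contains path) && pvRemTest path)
    PySem.List.slice (preferred ++ remaining) none (some limit)

-- ===== PORT B =====
def select_reference_paths_py_alt (paths : List String) (limit : Int) : List String :=
  let buckets := paths.foldl
    (fun (s : List String × List String) path =>
      if pvPrefTest path then (s.1 ++ [path], s.2)
      else if pvRemTest path then (s.1, s.2 ++ [path])
      else s)
    ([], [])
  let preferred := buckets.1
  let remaining := buckets.2
  if limit ≤ (preferred.length : Int) then
    PySem.List.slice preferred none (some limit)
  else
    PySem.List.slice (preferred ++ remaining) none (some limit)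

-- ===== PRECONDITION & SPEC =====
def Spec_select_reference_paths_py (paths : List String) (limit : Int) (out : List String) : Prop := out = select_reference_paths_py_alt paths limit
instance (paths : List String) (limit : Int) (out : List String) : Decidable (Spec_select_reference_paths_py paths limit out) := by unfold Spec_select_reference_paths_py; infer_instance

-- ===== CLAIM (what is proved, stated in full; the proofs are below) =====
def Claim_equal_select_reference_paths_py : Prop := ∀ (paths : List String) (limit : Int), Dom_select_reference_paths_py paths limit → Spec_select_reference_paths_py paths limit (select_reference_paths_py paths limit)

-- ===== LEMMAS AND PROOFS =====

-- B's pair-state loop computes the two filters at once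
lemma pvPairFold (paths : List String) (pr rm : List String) :
    paths.foldl
      (fun (s : List String × List String) path =>
        if pvPrefTest path then (s.1 ++ [path], s.2)
        else if pvRemTest path then (s.1, s.2 ++ [path])
        else s)
      (pr, rm)
    = (pr ++ paths.filter pvPrefTest,
       rm ++ paths.filter (fun p => !pvPrefTest p && pvRemTest p)) := by
  induction paths generalizing pr rm with
  | nil => simp
  | cons x xs ih =>
    by_cases hq : pvPrefTest x
    · simp [List.foldl_cons, hq, ih]
    · by_cases hr : pvRemTest x <;> simp [List.foldl_cons, hq, hr, ih]

-- inside `paths`, membership in A's `preferred` is exactly the preferred test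
lemma pvRemainingCongr (paths : List String) :
    paths.filter (fun path => !((paths.filter pvPrefTest).contains path) && pvRemTest path)
    = paths.filter (fun p => !pvPrefTest p && pvRemTest p) := by
  apply List.filter_congr
  intro x hx
  have : (paths.filter pvPrefTest).contains x = pvPrefTest x := by
    by_cases h : pvPrefTest x
    · simp [List.mem_filter, hx, h]
    · simp [List.mem_filter, h]
  rw [this]

-- ===== VERDICT (by name: the statement is the Claim_ definition above) =====
theorem select_reference_paths_py_spec : Claim_equal_select_reference_paths_py := by
  intro paths limit _
  unfold Spec_select_reference_paths_py select_reference_paths_py select_reference_paths_py_alt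
  rw [pvPairFold, PySem.List.foldl_append_if_eq_filter]
  simp only [List.nil_append]
  rw [pvRemainingCongr]
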